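-- pv_equiv track=rewrite | github.com/gaboliveira-alt/Old-Codes-in-Python | Python/prob1234.py | is_dancing_sentence2
-- ===== SOURCE A (Python) =====
-- def is_dancing_sentence2(text):
--     upper = True
--     dancing_text = ''
--     for char in text:
--         if char == ' ':
--             dancing_text += char
--             continue
--
--         dancing_text += char.upper() if upper else char.lower()
--         upper = not upper
--     return dancing_text
-- ===== SOURCE B (Python) =====
-- def is_dancing_sentence2(text):
--     letters = [c for c in text if c != ' ']
--     styled = [c.upper() if i % 2 == 0 else c.lower() for i, c in enumerate(letters)]
--     it = iter(styled)
--     return ''.join(' ' if c == ' ' else next(it) for c in text)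
-- ===== Notes on version B (the rewrite author's own statement) =====
-- stated objective: alternative
-- what changed: Replaces the single stateful flag-toggling loop with a three-stage pipeline: extract non-space characters, case them by index parity in a comprehension, then reassemble along the original text pulling styled letters from an iterator.
import Mathlib
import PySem

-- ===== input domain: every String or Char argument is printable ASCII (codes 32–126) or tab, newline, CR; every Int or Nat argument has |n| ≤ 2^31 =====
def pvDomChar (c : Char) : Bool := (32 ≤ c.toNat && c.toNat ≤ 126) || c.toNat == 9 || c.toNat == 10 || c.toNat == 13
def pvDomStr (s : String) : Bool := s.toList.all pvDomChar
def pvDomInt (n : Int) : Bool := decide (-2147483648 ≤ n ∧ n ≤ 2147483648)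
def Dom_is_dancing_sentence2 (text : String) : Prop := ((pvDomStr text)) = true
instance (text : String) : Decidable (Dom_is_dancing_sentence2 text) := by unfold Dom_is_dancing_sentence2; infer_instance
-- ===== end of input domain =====

-- B restructures A's single flag-toggling loop into a three-stage pipeline
-- (filter out spaces, case letters by index parity, reassemble along the original text).

-- ===== PORT A =====
-- one accumulating loop over the text: (upper flag, built-up text)
def is_dancing_sentence2 (text : String) : String :=
  (text.toList.foldl
    (fun (st : Bool × List Char) c =>
      if c = ' ' then (st.1, st.2 ++ [c])
      else (!st.1, st.2 ++ [if st.1 then PySem.Chars.upperChar c else PySem.Chars.lowerChar c]))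
    (true, [])).2.asString

-- ===== PORT B =====
-- reassembly pass: keep ' ', otherwise pull the next styled letter (the iterator in Source B);
-- the [] case of the iterator is unreachable (styled has one letter per non-space char)
def pvMergeStyled : List Char → List Char → List Char
  | [], _ => []
  | c :: cs, ss =>
    if c = ' ' then ' ' :: pvMergeStyled cs ss
    else
      match ss with
      | [] => []
      | s :: rest => s :: pvMergeStyled cs rest

def is_dancing_sentence2_alt (text : String) : String :=
  let letters := text.toList.filter (fun c => c ≠ ' ')
  let styled := (PySem.List.enumerate letters).map
    (fun p => if p.1 % 2 = 0 then PySem.Chars.upperChar p.2 else PySem.Chars.lowerChar p.2)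
  (pvMergeStyled text.toList styled).asString

-- ===== PRECONDITION & SPEC =====
def Spec_is_dancing_sentence2 (text : String) (out : String) : Prop := out = is_dancing_sentence2_alt text
instance (text : String) (out : String) : Decidable (Spec_is_dancing_sentence2 text out) := by unfold Spec_is_dancing_sentence2; infer_instance

-- ===== CLAIM (what is proved, stated in full; the proofs are below) =====
def Claim_equal_is_dancing_sentence2 : Prop := ∀ (text : String), Dom_is_dancing_sentence2 text → Spec_is_dancing_sentence2 text (is_dancing_sentence2 text)

-- ===== LEMMAS AND PROOFS =====

-- A's loop with the accumulator factored out
def pvDance : List Char → Bool → List Char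
  | [], _ => []
  | c :: cs, u =>
    if c = ' ' then c :: pvDance cs u
    else (if u then PySem.Chars.upperChar c else PySem.Chars.lowerChar c) :: pvDance cs (!u)

theorem pvFoldA (cs : List Char) (u : Bool) (acc : List Char) :
    (cs.foldl
      (fun (st : Bool × List Char) c =>
        if c = ' ' then (st.1, st.2 ++ [c])
        else (!st.1, st.2 ++ [if st.1 then PySem.Chars.upperChar c else PySem.Chars.lowerChar c]))
      (u, acc)).2 = acc ++ pvDance cs u := by
  induction cs generalizing u acc with
  | nil => simp [pvDance]
  | cons c cs ih =>
    by_cases h : c = ' ' <;> simp [pvDance, h, ih]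

-- B's pipeline (at any start index s) equals A's loop with flag = (s even)
theorem pvMergeEq (cs : List Char) (s : Int) :
    pvMergeStyled cs
      ((PySem.List.enumerate (cs.filter (fun c => c ≠ ' ')) s).map
        (fun p => if p.1 % 2 = 0 then PySem.Chars.upperChar p.2 else PySem.Chars.lowerChar p.2))
      = pvDance cs (decide (s % 2 = 0)) := by
  induction cs generalizing s with
  | nil => simp only [pvMergeStyled, pvDance]
  | cons c cs ih =>
    rw [List.filter_cons]
    by_cases h : c = ' '
    · subst h
      rw [if_neg (by simp)]
      show pvMergeStyled (' ' :: cs) _ = _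
      rw [pvDance, if_pos rfl, ← ih s]
      simp [pvMergeStyled]
    · have hpar : decide ((s + 1) % 2 = 0) = !decide (s % 2 = 0) := by
        by_cases hp : s % 2 = 0 <;> simp [hp] <;> omega
      rw [if_pos (by simp [h]), PySem.List.enumerate_cons, List.map_cons,
        pvDance, if_neg h, ← hpar, ← ih (s + 1)]
      simp only [pvMergeStyled, if_neg h]
      by_cases hp : s % 2 = 0 <;> simp [hp]

-- ===== VERDICT (by name: the statement is the Claim_ definition above) =====
theorem is_dancing_sentence2_spec : Claim_equal_is_dancing_sentence2 := by
  intro text _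
  show _ = _
  simp only [is_dancing_sentence2, is_dancing_sentence2_alt]
  rw [pvFoldA, List.nil_append, pvMergeEq]
  norm_num
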